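-- pv_equiv track=rewrite | github.com/kkartaltepe/ch.py | example.py | getPollResults
-- ===== SOURCE A (Python) =====
-- def getPollResults(votes):
--     numVotes = 0
--     topChoice = "Nothing", 0
--     for choice in votes.keys():
--         numVotes += votes[choice]
--         if votes[choice] > topChoice[1]:
--             topChoice = choice, votes[choice]
--     return topChoice, numVotes
-- ===== SOURCE B (Python) =====
-- def getPollResults(votes):
--     numVotes = sum(votes.values())
--     best = max(votes.values(), default=0)
--     if best > 0:
--         choice = next(k for k, v in votes.items() if v == best)
--         topChoice = choice, best
--     else:
--         topChoice = "Nothing", 0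
--     return topChoice, numVotes
-- ===== Notes on version B (the rewrite author's own statement) =====
-- stated objective: idiomatic
-- what changed: Replaces the fused accumulate-and-argmax loop with built-ins: sum() for the total, max() over the values for the best count, and a generator next() to find the first key attaining it, keeping the sentinel result when no value is positive.
import Mathlib
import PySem

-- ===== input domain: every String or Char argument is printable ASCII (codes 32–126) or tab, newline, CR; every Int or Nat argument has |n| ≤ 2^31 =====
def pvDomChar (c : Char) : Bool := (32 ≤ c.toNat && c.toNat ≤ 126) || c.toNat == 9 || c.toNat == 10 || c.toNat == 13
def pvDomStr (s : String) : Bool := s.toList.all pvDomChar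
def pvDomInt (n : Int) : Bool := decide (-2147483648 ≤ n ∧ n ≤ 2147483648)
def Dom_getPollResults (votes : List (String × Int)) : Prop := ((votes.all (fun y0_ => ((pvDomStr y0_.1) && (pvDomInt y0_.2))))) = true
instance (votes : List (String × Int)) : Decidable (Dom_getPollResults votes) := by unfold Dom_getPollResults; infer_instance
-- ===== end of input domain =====

-- B computes the total with sum() and the winner via max() over the values plus a first-match scan,
-- instead of A's fused accumulate-and-argmax loop (objective: idiomatic; same cost).


-- ===== PORT A =====
-- for choice in votes.keys(): numVotes += votes[choice]; if votes[choice] > topChoice[1]: topChoice = choice, votes[choice]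
-- (votes is a dict, so its keys are distinct and votes[choice] is the pair's own value)
def getPollResults (votes : List (String × Int)) : (String × Int) × Int :=
  let st := votes.foldl
    (fun (st : (String × Int) × Int) p =>
      let numVotes := st.2 + p.2
      let topChoice := if p.2 > st.1.2 then p else st.1
      (topChoice, numVotes))
    (("Nothing", 0), 0)
  (st.1, st.2)

-- ===== PORT B =====
-- numVotes = sum(votes.values()); best = max(votes.values(), default=0);
-- if best > 0: topChoice = first (k, v) with v == best; else ('Nothing', 0)
def getPollResults_alt (votes : List (String × Int)) : (String × Int) × Int :=
  let numVotes := (votes.map (·.2)).foldl (· + ·) 0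
  let best := match PySem.List.max? (votes.map (·.2)) (fun v => v) with
    | none => 0
    | some m => m
  let topChoice :=
    if best > 0 then
      match votes.find? (fun kv => kv.2 == best) with
      | some kv => (kv.1, best)
      | none => ("Nothing", 0)  -- unreachable: best > 0 means best occurs among the values
    else ("Nothing", 0)
  (topChoice, numVotes)

-- ===== PRECONDITION & SPEC =====
def Spec_getPollResults (votes : List (String × Int)) (out : (String × Int) × Int) : Prop := out = getPollResults_alt votes
instance (votes : List (String × Int)) (out : (String × Int) × Int) : Decidable (Spec_getPollResults votes out) := by unfold Spec_getPollResults; infer_instance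

-- ===== CLAIM (what is proved, stated in full; the proofs are below) =====
def Claim_equal_getPollResults : Prop := ∀ (votes : List (String × Int)), Dom_getPollResults votes → Spec_getPollResults votes (getPollResults votes)

-- ===== LEMMAS AND PROOFS =====

-- A's argmax component alone
def argmaxFrom (t : String × Int) (l : List (String × Int)) : String × Int :=
  l.foldl (fun t p => if p.2 > t.2 then p else t) t

theorem foldA_split (l : List (String × Int)) (t : String × Int) (n : Int) :
    l.foldl
      (fun (st : (String × Int) × Int) p =>
        let numVotes := st.2 + p.2
        let topChoice := if p.2 > st.1.2 then p else st.1
        (topChoice, numVotes)) (t, n)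
    = (argmaxFrom t l, l.foldl (fun a p => a + p.2) n) := by
  induction l generalizing t n with
  | nil => rfl
  | cons p rest ih => simp [argmaxFrom, List.foldl_cons, ih]

theorem foldl_max_comm (l : List Int) (a b : Int) :
    l.foldl max (max a b) = max a (l.foldl max b) := by
  induction l generalizing b with
  | nil => rfl
  | cons x t ih =>
      simp only [List.foldl_cons]
      rw [max_assoc, ih]

theorem le_foldl_max' (l : List Int) (a : Int) : a ≤ l.foldl max a := by
  induction l generalizing a with
  | nil => simp
  | cons x t ih => exact le_trans (le_max_left a x) (ih (max a x))

theorem foldl_max_attains (l : List Int) (a : Int) :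
    l.foldl max a = a ∨ l.foldl max a ∈ l := by
  induction l generalizing a with
  | nil => simp
  | cons x t ih =>
      simp only [List.foldl_cons]
      rcases ih (max a x) with h | h
      · rcases max_cases a x with ⟨he, _⟩ | ⟨he, _⟩
        · left; rw [h, he]
        · right; rw [h, he]; exact List.mem_cons_self
      · right; exact List.mem_cons_of_mem _ h

-- first-strict-improvement argmax = first element attaining the running maximum
theorem argmax_char (l : List (String × Int)) (t : String × Int) :
    argmaxFrom t l =
      if t.2 < (l.map (·.2)).foldl max t.2 then
        ((l.find? (fun kv => kv.2 == (l.map (·.2)).foldl max t.2)).getD t)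
      else t := by
  induction l generalizing t with
  | nil => simp [argmaxFrom]
  | cons p rest ih =>
      have hstep : argmaxFrom t (p :: rest) = argmaxFrom (if p.2 > t.2 then p else t) rest := rfl
      set t' : String × Int := if p.2 > t.2 then p else t with ht'
      have ht'2 : t'.2 = max t.2 p.2 := by
        rw [ht']; rcases le_or_gt p.2 t.2 with h | h
        · simp [not_lt.mpr h, h]
        · simp [h, max_eq_right (le_of_lt h)]
      have hM : ((p :: rest).map (·.2)).foldl max t.2 = (rest.map (·.2)).foldl max t'.2 := by
        simp [ht'2]
      rw [hstep, ih t', hM]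
      set M := (rest.map (·.2)).foldl max t'.2 with hMdef
      have hle : t'.2 ≤ M := le_foldl_max' _ _
      by_cases hlt : t'.2 < M
      · -- M is achieved strictly inside rest
        have hmem : M ∈ rest.map (·.2) := by
          rcases foldl_max_attains (rest.map (·.2)) t'.2 with h | h
          · omega
          · exact h
        have hfind : (rest.find? (fun kv => kv.2 == M)).isSome := by
          rcases List.mem_map.mp hmem with ⟨kv, hkv, hv⟩
          exact List.find?_isSome.mpr ⟨kv, hkv, by simp [hv]⟩
        have htlt : t.2 < M := lt_of_le_of_lt (by rw [ht'2]; exact le_max_left _ _) hlt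
        have hpne : (p.2 == M) = false := by
          have : p.2 < M := lt_of_le_of_lt (by rw [ht'2]; exact le_max_right _ _) hlt
          simp [ne_of_lt this]
        rw [if_pos hlt, if_pos htlt]
        rw [List.find?_cons_of_neg (by simp [hpne])]
        obtain ⟨x, hx⟩ := Option.isSome_iff_exists.mp hfind
        rw [hx]; rfl
      · -- no improvement in rest: result is t'
        have hMeq : M = t'.2 := le_antisymm (not_lt.mp hlt) hle
        rw [if_neg hlt]
        rcases le_or_gt p.2 t.2 with h | h
        · -- t' = t, M = t.2
          have ht'eq : t' = t := by rw [ht']; simp [not_lt.mpr h]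
          rw [if_neg (by rw [hMeq, ht'eq]; exact lt_irrefl _)]
          exact ht'eq
        · -- t' = p, M = p.2 > t.2: find? hits p first
          have ht'eq : t' = p := by rw [ht']; simp [h]
          have htlt : t.2 < M := by rw [hMeq, ht'eq]; exact h
          rw [if_pos htlt]
          rw [List.find?_cons_of_pos (by simp [hMeq, ht'eq])]
          simp [ht'eq]

theorem getPollResults_spec_aux (votes : List (String × Int)) :
    getPollResults votes = getPollResults_alt votes := by
  unfold getPollResults getPollResults_alt
  simp only [foldA_split]
  refine Prod.ext ?_ (by simp [List.foldl_map])
  -- top components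
  simp only
  rw [argmax_char]
  cases votes with
  | nil => simp [PySem.List.max?]
  | cons p rest =>
      rw [List.map_cons, PySem.List.max?_id_cons]
      simp only [List.foldl_cons]
      have hcomm : (rest.map (·.2)).foldl max (max 0 p.2) = max 0 ((rest.map (·.2)).foldl max p.2) :=
        foldl_max_comm _ _ _
      set b := (rest.map (·.2)).foldl max p.2 with hb
      rw [hcomm]
      by_cases hpos : 0 < b
      · have h1 : (0 : Int) < max 0 b := by omega
        have h2 : max (0 : Int) b = b := max_eq_right (le_of_lt hpos)
        rw [if_pos h1, if_pos hpos, h2]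
        have hmem : b ∈ (p :: rest).map (·.2) := by
          rcases foldl_max_attains (rest.map (·.2)) p.2 with h | h
          · rw [List.map_cons]; rw [← h]; exact List.mem_cons_self
          · rw [List.map_cons]; exact List.mem_cons_of_mem _ h
        have hfind : ((p :: rest).find? (fun kv => kv.2 == b)).isSome := by
          rcases List.mem_map.mp hmem with ⟨kv, hkv, hv⟩
          exact List.find?_isSome.mpr ⟨kv, hkv, by simp [hv]⟩
        obtain ⟨x, hx⟩ := Option.isSome_iff_exists.mp hfind
        have hx2 : x.2 = b := by
          have := List.find?_some hx
          simpa using this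
        rw [hx]
        simp only [Option.getD_some]
        exact Prod.ext rfl hx2
      · have h1 : ¬ (0 : Int) < max 0 b := by omega
        rw [if_neg h1, if_neg hpos]

-- ===== VERDICT (by name: the statement is the Claim_ definition above) =====
theorem getPollResults_spec : Claim_equal_getPollResults := by
  intro votes _
  unfold Spec_getPollResults
  exact getPollResults_spec_aux votes
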